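-- pv_equiv track=rewrite | github.com/Strumpa/PolyBWR_project | Version5_wc/PyGan/data/Gd157_rates_XS_proc/D5_vs_S2.py | initialize_nested_dict
-- ===== SOURCE A (Python) =====
-- def initialize_nested_dict(S2_libs, keywords, isotopes, reactions, ssh_methods):
--     """
--     Initializes a nested dictionary with the structure:
--     S2_libs -> keywords -> isotopes -> reactions -> ssh_methods -> empty list.
--
--     Parameters:
--         S2_libs (list): List of keys for the first level.
--         keywords (list): List of keys for the second level.
--         isotopes (list): List of keys for the third level.
--         reactions (list): List of keys for the fourth level.
--         ssh_methods (list): List of keys for the innermost level.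
--
--     Returns:
--         dict: Nested dictionary with the specified structure.
--     """
--     nested_dict = {}
--
--     for lib in S2_libs:
--         nested_dict[lib] = {}
--         for keyword in keywords:
--             nested_dict[lib][keyword] = {}
--             for isotope in isotopes:
--                 nested_dict[lib][keyword][isotope] = {}
--                 for reaction in reactions:
--                     nested_dict[lib][keyword][isotope][reaction] = {}
--                     for ssh_method in ssh_methods:
--                         nested_dict[lib][keyword][isotope][reaction][ssh_method] = []
--
--     return nested_dict
-- ===== SOURCE B (Python) =====
-- def initialize_nested_dict(S2_libs, keywords, isotopes, reactions, ssh_methods):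
--     """Build the 5-level nested dict by a single recursion over the list of
--     key-levels instead of five hand-written nested loops; a fresh empty list
--     is created per leaf (each recursive call builds new objects)."""
--     def build(levels):
--         if not levels:
--             return []
--         return {key: build(levels[1:]) for key in levels[0]}
--     return build([S2_libs, keywords, isotopes, reactions, ssh_methods])
-- ===== Notes on version B (the rewrite author's own statement) =====
-- stated objective: simpler
-- what changed: Replaces the five hand-written nested loops (which create each inner dict and then fill it key by key via in-place mutation) with a single recursive build over the list of key-levels, a dict comprehension per level.
import Mathlib
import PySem

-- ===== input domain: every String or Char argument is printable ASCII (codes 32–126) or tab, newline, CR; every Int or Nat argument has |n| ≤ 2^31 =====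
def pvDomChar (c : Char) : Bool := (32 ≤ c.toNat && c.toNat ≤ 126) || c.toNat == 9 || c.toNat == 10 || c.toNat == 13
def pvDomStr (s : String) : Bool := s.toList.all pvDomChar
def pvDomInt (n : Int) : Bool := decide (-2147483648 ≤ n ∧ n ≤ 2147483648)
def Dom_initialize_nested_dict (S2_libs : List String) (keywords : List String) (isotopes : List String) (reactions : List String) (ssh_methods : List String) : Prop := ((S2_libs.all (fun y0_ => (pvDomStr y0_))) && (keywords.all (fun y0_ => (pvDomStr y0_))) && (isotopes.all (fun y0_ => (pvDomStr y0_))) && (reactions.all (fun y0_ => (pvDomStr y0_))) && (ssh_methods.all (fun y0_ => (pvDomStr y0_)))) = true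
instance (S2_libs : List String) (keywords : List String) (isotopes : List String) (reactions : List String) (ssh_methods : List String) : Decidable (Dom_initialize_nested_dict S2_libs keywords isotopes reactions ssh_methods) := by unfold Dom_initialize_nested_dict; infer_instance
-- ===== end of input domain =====

-- B replaces A's five hand-written nested mutation loops with one recursion over the
-- list of key-levels (a dict comprehension per level); same cost, simpler code.

-- Type-convention bridge (shared by both ports): a Python dict is returned as its
-- association list in insertion order, applied through the nesting levels.
def pvItemsMap {α β : Type} (f : α → β) (d : PySem.Dict String α) : List (String × β) :=
  d.items.map (fun p => (p.1, f p.2))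

-- ===== PORT A =====
-- Literal transliteration of A's five nested loops.  Python's in-place
-- 'nested_dict[lib][kw]... = x' becomes 'Dict.modify' along the access path
-- (the default of 'modify' is never used: the key was inserted just before).
def initialize_nested_dict (S2_libs : List String) (keywords : List String) (isotopes : List String) (reactions : List String) (ssh_methods : List String) : List (String × List (String × List (String × List (String × List (String × List Int))))) :=
  let e5 : PySem.Dict String (List Int) := PySem.Dict.empty
  let e4 : PySem.Dict String (PySem.Dict String (List Int)) := PySem.Dict.empty
  let e3 : PySem.Dict String (PySem.Dict String (PySem.Dict String (List Int))) := PySem.Dict.empty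
  let e2 : PySem.Dict String (PySem.Dict String (PySem.Dict String (PySem.Dict String (List Int)))) := PySem.Dict.empty
  let nested_dict :=
    S2_libs.foldl (fun d lib =>
      let d := d.insert lib e2                                              -- nested_dict[lib] = {}
      keywords.foldl (fun d keyword =>
        let d := d.modify lib e2 (fun m => m.insert keyword e3)             -- nested_dict[lib][keyword] = {}
        isotopes.foldl (fun d isotope =>
          let d := d.modify lib e2 (fun m => m.modify keyword e3 (fun m => m.insert isotope e4))
          reactions.foldl (fun d reaction =>
            let d := d.modify lib e2 (fun m => m.modify keyword e3 (fun m => m.modify isotope e4 (fun m => m.insert reaction e5)))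
            ssh_methods.foldl (fun d ssh_method =>
              d.modify lib e2 (fun m => m.modify keyword e3 (fun m => m.modify isotope e4 (fun m => m.modify reaction e5 (fun m => m.insert ssh_method ([] : List Int)))))) d) d) d) d)
      PySem.Dict.empty
  pvItemsMap (pvItemsMap (pvItemsMap (pvItemsMap (pvItemsMap id)))) nested_dict

-- ===== PORT B =====
-- B's 'build' recurses over the list of levels; each recursive step is the dict
-- comprehension '{key: build(rest) for key in level}'.  The heterogeneously typed
-- recursion is unrolled (the depth is fixed by the result type); one comprehension
-- step is 'pvBuildLevel'.
def pvBuildLevel {α : Type} (keys : List String) (sub : α) : PySem.Dict String α :=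
  keys.foldl (fun d k => d.insert k sub) PySem.Dict.empty

def initialize_nested_dict_alt (S2_libs : List String) (keywords : List String) (isotopes : List String) (reactions : List String) (ssh_methods : List String) : List (String × List (String × List (String × List (String × List (String × List Int))))) :=
  pvItemsMap (pvItemsMap (pvItemsMap (pvItemsMap (pvItemsMap id))))
    (pvBuildLevel S2_libs (pvBuildLevel keywords (pvBuildLevel isotopes
      (pvBuildLevel reactions (pvBuildLevel ssh_methods ([] : List Int))))))

-- ===== PRECONDITION & SPEC =====
def Spec_initialize_nested_dict (S2_libs : List String) (keywords : List String) (isotopes : List String) (reactions : List String) (ssh_methods : List String) (out : List (String × List (String × List (String × List (String × List (String × List Int)))))) : Prop := out = initialize_nested_dict_alt S2_libs keywords isotopes reactions ssh_methods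
instance (S2_libs : List String) (keywords : List String) (isotopes : List String) (reactions : List String) (ssh_methods : List String) (out : List (String × List (String × List (String × List (String × List (String × List Int)))))) : Decidable (Spec_initialize_nested_dict S2_libs keywords isotopes reactions ssh_methods out) := by
  unfold Spec_initialize_nested_dict
  haveI : DecidableEq (List (String × List Int)) := inferInstance
  haveI : DecidableEq (List (String × List (String × List Int))) := inferInstance
  haveI : DecidableEq (List (String × List (String × List (String × List Int)))) := inferInstance
  haveI : DecidableEq (List (String × List (String × List (String × List (String × List Int))))) := inferInstance
  infer_instance

-- ===== CLAIM (what is proved, stated in full; the proofs are below) =====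
def Claim_equal_initialize_nested_dict : Prop := ∀ (S2_libs : List String) (keywords : List String) (isotopes : List String) (reactions : List String) (ssh_methods : List String), Dom_initialize_nested_dict S2_libs keywords isotopes reactions ssh_methods → Spec_initialize_nested_dict S2_libs keywords isotopes reactions ssh_methods (initialize_nested_dict S2_libs keywords isotopes reactions ssh_methods)

-- ===== LEMMAS AND PROOFS =====

-- 'd[k] = v; then d[k] = f(d[k])' is 'd[k] = f(v)'
theorem pv_modify_insert_self {α : Type} (d : PySem.Dict String α) (k : String) (v d0 : α) (f : α → α) :
    (d.insert k v).modify k d0 f = d.insert k (f v) := by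
  simp [PySem.Dict.modify, PySem.Dict.getD_insert_self, PySem.Dict.insert_insert_self]

-- two consecutive updates at the same key compose
theorem pv_modify_modify_self {α : Type} (d : PySem.Dict String α) (k : String) (d0 : α) (f g : α → α) :
    (d.modify k d0 f).modify k d0 g = d.modify k d0 (fun a => g (f a)) := by
  rw [show d.modify k d0 f = d.insert k (f (d.getD k d0)) from rfl, pv_modify_insert_self]
  rfl

-- a loop of updates at key k, started from 'insert k v', is one insert of the folded value
theorem pv_foldl_modify_insert {α β : Type} (k : String) (d0 : α) (g : α → β → α) :
    ∀ (L : List β) (d : PySem.Dict String α) (v : α),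
      L.foldl (fun d b => d.modify k d0 (fun a => g a b)) (d.insert k v) = d.insert k (L.foldl g v) := by
  intro L
  induction L with
  | nil => intro d v; rfl
  | cons b t ih => intro d v; simp only [List.foldl_cons, pv_modify_insert_self, ih]

-- a loop of updates at key k, started from 'modify k f', is one modify of the folded value
theorem pv_foldl_modify_modify {α β : Type} (k : String) (d0 : α) (g : α → β → α) :
    ∀ (L : List β) (d : PySem.Dict String α) (f : α → α),
      L.foldl (fun d b => d.modify k d0 (fun a => g a b)) (d.modify k d0 f) = d.modify k d0 (fun a => L.foldl g (f a)) := by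
  intro L
  induction L with
  | nil => intro d f; rfl
  | cons b t ih => intro d f; simp only [List.foldl_cons, pv_modify_modify_self, ih]

theorem initialize_nested_dict_spec : Claim_equal_initialize_nested_dict := by
  intro S2_libs keywords isotopes reactions ssh_methods _
  unfold Spec_initialize_nested_dict initialize_nested_dict initialize_nested_dict_alt
  -- collapse the loop nest innermost-first into B's level-by-level build
  simp only [pv_foldl_modify_modify, pv_foldl_modify_insert]
  rfl
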